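-- pv_equiv track=rewrite | github.com/GenLI3202/Edx-MIT-6.00x-Intro-CS-and-Programming | MIT 6.00.1X CS with Python/Week 2_Simple Programs/lecture 4_Functions/Check_Char_in_String.py | isIn_Iter
-- ===== SOURCE A (Python) =====
-- def isIn_Iter(char, aStr):
--     '''
--     char: a single character
--     aStr: an alphabetized string
--
--     returns: True if char is in aStr; False otherwise
--     '''
-- #determine how to bisect the length
--     Start = 0
--     End = len(aStr)
--     Dist = (End - Start)
--     while Dist > 1:
--         CheckP = (Start+End)//2
--         if char == aStr[CheckP]:
--             return True
--         elif char < aStr[CheckP]: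
--             End = CheckP
--         elif char > aStr[CheckP]:
--             Start = CheckP
--         Dist = (End - Start)
--     return False
-- ===== SOURCE B (Python) =====
-- def isIn_Iter(char, aStr):
--     '''
--     char: a single character
--     aStr: an alphabetized string
--
--     returns: True if char is in aStr; False otherwise
--     '''
--     def search(seg):
--         if len(seg) <= 1:
--             return False
--         m = len(seg) // 2
--         if char == seg[m]:
--             return True
--         if char < seg[m]:
--             return search(seg[:m])
--         return search(seg[m:])
--     return search(aStr)
-- ===== Notes on version B (the rewrite author's own statement) =====
-- stated objective: alternative
-- what changed: Replaces the while-loop binary search over an explicit (Start, End) index pair by a recursive helper that bisects the current string slice itself (seg[:m] / seg[m:], relative midpoint len(seg)//2), exploiting that (Start+End)//2 - Start = (End-Start)//2.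
import Mathlib
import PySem

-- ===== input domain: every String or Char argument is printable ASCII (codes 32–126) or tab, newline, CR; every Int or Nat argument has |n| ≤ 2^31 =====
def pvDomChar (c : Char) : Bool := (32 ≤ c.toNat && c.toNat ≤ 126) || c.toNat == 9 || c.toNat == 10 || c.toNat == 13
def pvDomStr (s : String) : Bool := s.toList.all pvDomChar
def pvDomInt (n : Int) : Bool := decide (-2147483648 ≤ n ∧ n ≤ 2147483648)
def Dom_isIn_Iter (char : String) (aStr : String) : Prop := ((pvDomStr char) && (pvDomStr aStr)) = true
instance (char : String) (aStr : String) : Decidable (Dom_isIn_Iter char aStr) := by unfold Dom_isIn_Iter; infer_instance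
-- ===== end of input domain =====

-- B bisects the current string slice itself instead of carrying a (Start, End) index pair; return values are identical on every input.

-- Python's lexicographic `<` on strings, over their character lists (exact for the code-point comparison Python performs).
def pyLt : List Char → List Char → Bool
  | _, [] => false
  | [], _ :: _ => true
  | a :: as, b :: bs => if a < b then true else if b < a then false else pyLt as bs

-- ===== PORT A =====
-- while-loop with state Start, End (Dist = End - Start is recomputed where A recomputes it)
def bisectA (cl : List Char) (cs : List Char) (Start End_ : Nat) : Bool :=
  if End_ - Start > 1 then
    -- CheckP = (Start + End_) // 2, written inline
    match cs[(Start + End_) / 2]? with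
    | none => false  -- IndexError: unreachable from the entry call (CheckP < End_ ≤ cs.length)
    | some ch =>
      if cl = [ch] then true
      else if pyLt cl [ch] then bisectA cl cs Start ((Start + End_) / 2)
      else if pyLt [ch] cl then bisectA cl cs ((Start + End_) / 2) End_
      else false  -- unreachable by trichotomy (A would loop forever here)
  else false
termination_by End_ - Start
decreasing_by all_goals omega

def isIn_Iter (char : String) (aStr : String) : Bool :=
  bisectA char.toList aStr.toList 0 aStr.toList.length

-- ===== PORT B =====
def searchB (cl : List Char) (seg : List Char) : Bool :=
  if seg.length ≤ 1 then false
  else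
    -- m = len(seg) // 2, written inline
    match seg[seg.length / 2]? with
    | none => false  -- IndexError: unreachable (m < seg.length)
    | some c =>
      if cl = [c] then true
      else if pyLt cl [c] then searchB cl (seg.take (seg.length / 2))
      else searchB cl (seg.drop (seg.length / 2))
termination_by seg.length
decreasing_by all_goals simp [List.length_take, List.length_drop]; omega

def isIn_Iter_alt (char : String) (aStr : String) : Bool :=
  searchB char.toList aStr.toList

-- ===== PRECONDITION & SPEC =====
def Spec_isIn_Iter (char : String) (aStr : String) (out : Bool) : Prop := out = isIn_Iter_alt char aStr
instance (char : String) (aStr : String) (out : Bool) : Decidable (Spec_isIn_Iter char aStr out) := by unfold Spec_isIn_Iter; infer_instance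

-- ===== CLAIM (what is proved, stated in full; the proofs are below) =====
def Claim_equal_isIn_Iter : Prop := ∀ (char : String) (aStr : String), Dom_isIn_Iter char aStr → Spec_isIn_Iter char aStr (isIn_Iter char aStr)

-- ===== LEMMAS AND PROOFS =====

theorem pyLt_trichotomy (a b : List Char) : a = b ∨ pyLt a b = true ∨ pyLt b a = true := by
  induction a generalizing b with
  | nil => cases b <;> simp [pyLt]
  | cons x xs ih =>
    cases b with
    | nil => simp [pyLt]
    | cons y ys =>
      rcases lt_trichotomy x y with h | h | h
      · right; left; simp [pyLt, h]
      · subst h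
        rcases ih ys with h2 | h2 | h2
        · left; simp [h2]
        · right; left; simpa [pyLt] using h2
        · right; right; simpa [pyLt] using h2
      · right; right; simp [pyLt, h]

theorem bisectA_eq_searchB (cl cs : List Char) :
    ∀ (n Start End_ : Nat), End_ - Start ≤ n → End_ ≤ cs.length →
      bisectA cl cs Start End_ = searchB cl ((cs.drop Start).take (End_ - Start)) := by
  intro n
  induction n with
  | zero =>
    intro Start End_ hn _
    rw [bisectA, searchB]
    simp [show End_ - Start = 0 from by omega]
  | succ n ih =>
    intro Start End_ hn hlen
    have hseglen : ((cs.drop Start).take (End_ - Start)).length = End_ - Start := by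
      simp [List.length_take, List.length_drop]; omega
    rw [bisectA, searchB]
    by_cases hg : End_ - Start > 1
    · have hmid : ((cs.drop Start).take (End_ - Start))[(End_ - Start) / 2]? =
          cs[(Start + End_) / 2]? := by
        rw [List.getElem?_take_of_lt (by omega), List.getElem?_drop]
        congr 1
        omega
      rw [hseglen, if_pos hg, if_neg (show ¬ End_ - Start ≤ 1 by omega), hmid]
      cases hc : cs[(Start + End_) / 2]? with
      | none => rfl
      | some ch =>
        simp only []
        by_cases heq : cl = [ch]
        · rw [if_pos heq, if_pos heq]
        · rw [if_neg heq, if_neg heq]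
          by_cases hlt2 : pyLt cl [ch] = true
          · rw [if_pos hlt2, if_pos hlt2,
                ih Start ((Start + End_) / 2) (by omega) (by omega), List.take_take]
            congr 2
            omega
          · have hgt : pyLt [ch] cl = true := by
              rcases pyLt_trichotomy cl [ch] with h | h | h
              · exact absurd h heq
              · exact absurd h hlt2
              · exact h
            rw [if_neg hlt2, if_neg hlt2, if_pos hgt,
                ih ((Start + End_) / 2) End_ (by omega) hlen,
                List.drop_take, List.drop_drop]
            have e1 : (Start + End_) / 2 = (End_ - Start) / 2 + Start := by omega
            rw [e1]
            congr 2
            · omega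
            · congr 1
              omega
    · rw [if_neg hg, hseglen, if_pos (show End_ - Start ≤ 1 by omega)]

-- ===== VERDICT (by name: the statement is the Claim_ definition above) =====
theorem isIn_Iter_spec : Claim_equal_isIn_Iter := by
  intro char aStr _
  unfold Spec_isIn_Iter isIn_Iter isIn_Iter_alt
  rw [bisectA_eq_searchB char.toList aStr.toList aStr.toList.length 0 aStr.toList.length
    (by omega) (le_refl _), Nat.sub_zero, List.drop_zero, List.take_length]
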